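-- pv_equiv track=rewrite | github.com/LauZyHou/SystemAnalysisToy | NNF_NBA/utils.py | cleanBracketsOnAP
-- ===== SOURCE A (Python) =====
-- from typing import Set, List, Tuple
--
-- def cleanBracketsOnAP(formula: str) -> str:
--     """清除原子命题两边的括号"""
--     # 先将True和False替换成其它字符串,保护起来
--     f = formula.replace('True', '#')
--     f = f.replace('False', '*')
--     # 记录不保留的数组下标,即'(a)'这样的三个字符
--     bye_set: Set[int] = set()
--     for i in range(1, len(f) - 1):
--         if ('z' >= f[i] >= 'a' or f[i] == '#' or f[i] == '*') and f[i - 1] == '(' and f[i + 1] == ')':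
--             bye_set |= {i - 1, i + 1}
--     # 遍历,只保留那些留下的下标,同时将True和False还原
--     ret_str = ''
--     for i in range(len(f)):
--         if i not in bye_set:
--             ret_str += 'True' if f[i] == '#' else ('False' if f[i] == '*' else f[i])
--     return ret_str
-- ===== SOURCE B (Python) =====
-- import re
--
-- def cleanBracketsOnAP(formula: str) -> str:
--     """清除原子命题两边的括号"""
--     # protect True/False, strip (x) around a single atomic proposition in one
--     # left-to-right regex pass, then restore
--     f = formula.replace('True', '#').replace('False', '*')
--     f = re.sub(r'\(([a-z#*])\)', r'\1', f)
--     return f.replace('#', 'True').replace('*', 'False')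
-- ===== Notes on version B (the rewrite author's own statement) =====
-- stated objective: idiomatic
-- what changed: The bye_set index-marking loop plus the index-filtering rebuild loop are replaced by a single left-to-right regex substitution pass (re.sub) that strips the parentheses around one protected atomic proposition per match; the True/False protection and restore steps are kept.
import Mathlib
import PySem

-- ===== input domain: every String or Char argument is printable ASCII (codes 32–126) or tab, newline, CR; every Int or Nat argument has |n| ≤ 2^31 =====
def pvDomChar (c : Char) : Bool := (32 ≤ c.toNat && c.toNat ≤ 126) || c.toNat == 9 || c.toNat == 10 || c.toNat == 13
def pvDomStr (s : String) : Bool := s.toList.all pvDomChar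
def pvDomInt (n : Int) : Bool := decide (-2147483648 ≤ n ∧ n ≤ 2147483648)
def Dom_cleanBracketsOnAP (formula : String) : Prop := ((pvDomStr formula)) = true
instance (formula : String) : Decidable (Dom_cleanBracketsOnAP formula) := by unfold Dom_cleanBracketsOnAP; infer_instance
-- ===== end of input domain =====

-- B replaces A's mark-an-index-set-then-filter loops by one left-to-right scan
-- (re.sub in Python) that strips '(x)' around a single protected atom; same value everywhere.

-- ===== PORT A =====
def cleanBracketsOnAP (formula : String) : String :=
  let f := PySem.Str.replace (PySem.Str.replace formula "True" "#") "False" "*"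
  let L := f.toList
  let n : Int := PySem.Str.len f
  let bye : PySem.Set Int :=
    (PySem.List.pyRange 1 (n - 1)).foldl (fun s i =>
      if (('a' ≤ PySem.List.pyGetD L i ' ' ∧ PySem.List.pyGetD L i ' ' ≤ 'z') ∨
            PySem.List.pyGetD L i ' ' = '#' ∨ PySem.List.pyGetD L i ' ' = '*') ∧
          PySem.List.pyGetD L (i - 1) ' ' = '(' ∧ PySem.List.pyGetD L (i + 1) ' ' = ')'
      then PySem.Set.union s (PySem.Set.ofList [i - 1, i + 1]) else s) PySem.Set.empty
  let ret : List Char :=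
    (PySem.List.pyRange 0 n).foldl (fun acc i =>
      if ¬ (PySem.Set.contains bye i = true) then
        acc ++ (if PySem.List.pyGetD L i ' ' = '#' then "True".toList
                else if PySem.List.pyGetD L i ' ' = '*' then "False".toList
                else [PySem.List.pyGetD L i ' '])
      else acc) []
  String.ofList ret

-- ===== PORT B =====
def pvAtomicB (c : Char) : Bool := (decide ('a' ≤ c) && decide (c ≤ 'z')) || c == '#' || c == '*'

-- hand port of re.sub(r'\(([a-z#*])\)', r'\1', ·): exact non-overlapping left-to-right scan
-- (at a match, emit the atom and continue after it; otherwise emit one char and advance)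
def pvStrip : List Char → List Char
  | '(' :: c :: ')' :: rest => if pvAtomicB c then c :: pvStrip rest else '(' :: pvStrip (c :: ')' :: rest)
  | x :: rest => x :: pvStrip rest
  | [] => []
  termination_by l => l.length

def cleanBracketsOnAP_alt (formula : String) : String :=
  let f := PySem.Str.replace (PySem.Str.replace formula "True" "#") "False" "*"
  let g := String.ofList (pvStrip f.toList)
  PySem.Str.replace (PySem.Str.replace g "#" "True") "*" "False"

-- ===== PRECONDITION & SPEC =====
def Spec_cleanBracketsOnAP (formula : String) (out : String) : Prop := out = cleanBracketsOnAP_alt formula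
instance (formula : String) (out : String) : Decidable (Spec_cleanBracketsOnAP formula out) := by unfold Spec_cleanBracketsOnAP; infer_instance

-- ===== CLAIM (what is proved, stated in full; the proofs are below) =====
def Claim_equal_cleanBracketsOnAP : Prop := ∀ (formula : String), Dom_cleanBracketsOnAP formula → Spec_cleanBracketsOnAP formula (cleanBracketsOnAP formula)

-- ===== LEMMAS AND PROOFS =====

-- the inline True/False restore of A, per character
def pvExpand (c : Char) : List Char :=
  if c = '#' then "True".toList else if c = '*' then "False".toList else [c]

-- pointwise characterisation of A's bye_set: position j is dropped
def pvBye (L : List Char) (j : Nat) : Bool :=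
  ((L[j]? == some '(') && (L[j+1]?.any pvAtomicB) && (L[j+2]? == some ')'))
  || (decide (2 ≤ j) && (L[j]? == some ')') && (L[j-1]?.any pvAtomicB) && (L[j-2]? == some '('))

-- the characters A keeps, by index
def pvKept (L : List Char) : List Char :=
  (List.range L.length).flatMap (fun j => if pvBye L j then [] else [L.getD j ' '])

lemma pvAtomicB_iff (c : Char) :
    pvAtomicB c = true ↔ (('a' ≤ c ∧ c ≤ 'z') ∨ c = '#' ∨ c = '*') := by
  simp [pvAtomicB, Bool.or_eq_true]; tauto

lemma pvReplace_go_single (o : Char) (new : List Char) :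
    ∀ (fuel : Nat) (cs acc : List Char), cs.length ≤ fuel →
      PySem.Chars.replace.go [o] new fuel cs acc
        = acc.reverse ++ cs.flatMap (fun c => if c = o then new else [c]) := by
  intro fuel
  induction fuel with
  | zero =>
    intro cs acc h
    have : cs = [] := by cases cs <;> simp_all
    subst this
    simp [PySem.Chars.replace.go]
  | succ n ih =>
    intro cs acc h
    cases cs with
    | nil => simp [PySem.Chars.replace.go]
    | cons c t =>
      simp only [PySem.Chars.replace.go]
      by_cases hc : c = o
      · subst hc
        have hp : List.isPrefixOf [c] (c :: t) = true := by simp [List.isPrefixOf]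
        simp only [hp, if_pos]
        rw [ih] <;> simp_all
      · have hp : List.isPrefixOf [o] (c :: t) = false := by
          simp [List.isPrefixOf]; exact fun h' => (hc h'.symm).elim
        simp only [hp]
        rw [if_neg (by simp)]
        rw [ih _ _ (by simpa using Nat.le_of_succ_le_succ (by simpa using h))]
        simp [hc]

lemma pvReplace_single (o : Char) (new cs : List Char) :
    PySem.Chars.replace cs [o] new = cs.flatMap (fun c => if c = o then new else [c]) := by
  rw [PySem.Chars.replace]
  simp only [List.isEmpty_cons]
  exact (pvReplace_go_single o new cs.length cs [] le_rfl).trans (by simp)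

lemma pvMem_foldl_union_pair (C : Int → Prop) [DecidablePred C] :
    ∀ (l : List Int) (s : PySem.Set Int) (x : Int),
      (x ∈ l.foldl (fun s i =>
          if C i then PySem.Set.union s (PySem.Set.ofList [i - 1, i + 1]) else s) s)
        ↔ (x ∈ s ∨ ∃ i ∈ l, C i ∧ (x = i - 1 ∨ x = i + 1)) := by
  intro l
  induction l with
  | nil => simp
  | cons a t ih =>
    intro s x
    simp only [List.foldl_cons]
    by_cases ha : C a
    · rw [if_pos ha, ih]
      simp [PySem.Set.mem_union, PySem.Set.mem_ofList, ha]
      constructor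
      · rintro ((hs | h1 | h2) | ⟨i, hi, hci, hx⟩)
        · exact Or.inl hs
        · exact Or.inr (Or.inl (Or.inl (by tauto)))
        · exact Or.inr (Or.inl (Or.inr (by tauto)))
        · exact Or.inr (Or.inr ⟨i, hi, hci, hx⟩)
      · rintro (hs | (h | h) | ⟨i, hi, hci, hx⟩)
        · exact Or.inl (Or.inl hs)
        · exact Or.inl (Or.inr (Or.inl (by tauto)))
        · exact Or.inl (Or.inr (Or.inr (by tauto)))
        · exact Or.inr ⟨i, hi, hci, hx⟩
    · rw [if_neg ha, ih]
      constructor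
      · rintro (hs | ⟨i, hi, hci, hx⟩)
        · exact Or.inl hs
        · exact Or.inr ⟨i, List.mem_cons_of_mem a hi, hci, hx⟩
      · rintro (hs | ⟨i, hi, hci, hx⟩)
        · exact Or.inl hs
        · rcases List.mem_cons.mp hi with hi | hi
          · exact absurd (hi ▸ hci) ha
          · exact Or.inr ⟨i, hi, hci, hx⟩

lemma pvBye_iff (L : List Char) (j : Nat) :
    pvBye L j = true ↔ ∃ k : Nat, 1 ≤ k ∧ k + 1 < L.length ∧
      (L[k]?.any pvAtomicB = true ∧ L[k-1]? = some '(' ∧ L[k+1]? = some ')') ∧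
      (j = k - 1 ∨ j = k + 1) := by
  constructor
  · intro h
    simp only [pvBye, Bool.or_eq_true, Bool.and_eq_true, beq_iff_eq, decide_eq_true_eq] at h
    rcases h with ⟨⟨h1, h2⟩, h3⟩ | ⟨⟨⟨h0, h1⟩, h2⟩, h3⟩
    · refine ⟨j + 1, by omega, ?_, ⟨by simpa using h2, by simpa using h1, by simpa using h3⟩, by omega⟩
      obtain ⟨hlt, -⟩ := List.getElem?_eq_some_iff.mp h3
      omega
    · refine ⟨j - 1, by omega, ?_, ?_, by omega⟩
      · obtain ⟨hlt, -⟩ := List.getElem?_eq_some_iff.mp h1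
        omega
      · have e1 : j - 1 - 1 = j - 2 := by omega
        have e2 : j - 1 + 1 = j := by omega
        exact ⟨h2, by rw [e1]; exact h3, by rw [e2]; exact h1⟩
  · rintro ⟨k, hk1, hk2, ⟨ha, hl, hr⟩, hj | hj⟩
    · subst hj
      have e1 : k - 1 + 1 = k := by omega
      have e2 : k - 1 + 2 = k + 1 := by omega
      simp [pvBye, e1, e2, ha, hl, hr]
    · subst hj
      have e1 : k + 1 - 1 = k := by omega
      have e2 : k + 1 - 2 = k - 1 := by omega
      simp [pvBye, e1, e2, ha, hl, hr]
      omega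

lemma pvC_iff (L : List Char) (k : Nat) (hk1 : 1 ≤ k) (hk2 : k + 1 < L.length) :
    ((('a' ≤ PySem.List.pyGetD L (k:Int) ' ' ∧ PySem.List.pyGetD L (k:Int) ' ' ≤ 'z') ∨
        PySem.List.pyGetD L (k:Int) ' ' = '#' ∨ PySem.List.pyGetD L (k:Int) ' ' = '*') ∧
      PySem.List.pyGetD L ((k:Int) - 1) ' ' = '(' ∧ PySem.List.pyGetD L ((k:Int) + 1) ' ' = ')')
   ↔ (L[k]?.any pvAtomicB = true ∧ L[k-1]? = some '(' ∧ L[k+1]? = some ')') := by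
  have c1 : ((k:Int) - 1) = ((k-1 : Nat) : Int) := by omega
  have c2 : ((k:Int) + 1) = ((k+1 : Nat) : Int) := by push_cast; ring
  rw [c1, c2, PySem.List.pyGetD_natCast, PySem.List.pyGetD_natCast, PySem.List.pyGetD_natCast]
  have e0 : L[k]? = some L[k] := List.getElem?_eq_getElem (by omega)
  have e1 : L[k-1]? = some L[k-1] := List.getElem?_eq_getElem (by omega)
  have e2 : L[k+1]? = some L[k+1] := List.getElem?_eq_getElem (by omega)
  have g0 : L.getD k ' ' = L[k] := List.getD_eq_getElem L ' ' (by omega)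
  have g1 : L.getD (k-1) ' ' = L[k-1] := List.getD_eq_getElem L ' ' (by omega)
  have g2 : L.getD (k+1) ' ' = L[k+1] := List.getD_eq_getElem L ' ' (by omega)
  rw [g0, g1, g2, e0, e1, e2]
  simp [Option.any_some, pvAtomicB_iff]

lemma pvContains_bye (L : List Char) (j : Nat) :
    PySem.Set.contains
      ((PySem.List.pyRange 1 ((L.length : Int) - 1)).foldl (fun s i =>
        if (('a' ≤ PySem.List.pyGetD L i ' ' ∧ PySem.List.pyGetD L i ' ' ≤ 'z') ∨
              PySem.List.pyGetD L i ' ' = '#' ∨ PySem.List.pyGetD L i ' ' = '*') ∧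
            PySem.List.pyGetD L (i - 1) ' ' = '(' ∧ PySem.List.pyGetD L (i + 1) ' ' = ')'
        then PySem.Set.union s (PySem.Set.ofList [i - 1, i + 1]) else s) PySem.Set.empty)
      (j : Int) = pvBye L j := by
  have hmem : ((j : Int) ∈ (PySem.List.pyRange 1 ((L.length : Int) - 1)).foldl (fun s i =>
        if (('a' ≤ PySem.List.pyGetD L i ' ' ∧ PySem.List.pyGetD L i ' ' ≤ 'z') ∨
              PySem.List.pyGetD L i ' ' = '#' ∨ PySem.List.pyGetD L i ' ' = '*') ∧
            PySem.List.pyGetD L (i - 1) ' ' = '(' ∧ PySem.List.pyGetD L (i + 1) ' ' = ')'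
        then PySem.Set.union s (PySem.Set.ofList [i - 1, i + 1]) else s) PySem.Set.empty)
      ↔ pvBye L j = true := by
    rw [pvMem_foldl_union_pair]
    rw [pvBye_iff]
    constructor
    · rintro (hempty | ⟨i, hi, hC, hj⟩)
      · simp [PySem.Set.empty] at hempty
      · rw [PySem.List.mem_pyRange_one] at hi
        have h0 : 0 ≤ i := by omega
        lift i to ℕ using h0 with k
        have hk1 : 1 ≤ k := by exact_mod_cast hi.1
        have hk2 : k + 1 < L.length := by omega
        refine ⟨k, hk1, hk2, (pvC_iff L k hk1 hk2).mp hC, ?_⟩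
        rcases hj with hj | hj
        · left; omega
        · right; omega
    · rintro ⟨k, hk1, hk2, hC, hj⟩
      refine Or.inr ⟨(k : Int), ?_, (pvC_iff L k hk1 hk2).mpr hC, ?_⟩
      · rw [PySem.List.mem_pyRange_one]; omega
      · rcases hj with hj | hj
        · left; omega
        · right; omega
  show List.contains _ _ = _
  rw [Bool.eq_iff_iff, List.contains_iff_mem]
  exact hmem

lemma pvBye_cons₃ (c : Char) (rest : List Char) (j : Nat) :
    pvBye ('(' :: c :: ')' :: rest) (j + 3) = pvBye rest j := by
  rcases j with _ | _ | j <;> simp [pvBye, pvAtomicB]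

lemma pvBye_cons₁ (x : Char) (M : List Char)
    (h : ¬ (x = '(' ∧ M[0]?.any pvAtomicB = true ∧ M[1]? = some ')')) (j : Nat) :
    pvBye (x :: M) (j + 1) = pvBye M j := by
  rcases j with _ | _ | j
  · simp [pvBye]
  · simp [pvBye]
    tauto
  · simp [pvBye]

lemma pvBye_zero (x : Char) (M : List Char)
    (h : ¬ (x = '(' ∧ M[0]?.any pvAtomicB = true ∧ M[1]? = some ')')) :
    pvBye (x :: M) 0 = false := by
  simp [pvBye]
  tauto

lemma pvKept_cons (x : Char) (M : List Char)
    (h : ¬ (x = '(' ∧ M[0]?.any pvAtomicB = true ∧ M[1]? = some ')')) :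
    pvKept (x :: M) = x :: pvKept M := by
  unfold pvKept
  have hl : (x :: M).length = 1 + M.length := by simp [Nat.add_comm]
  rw [hl, List.range_add, List.flatMap_append, List.flatMap_map]
  have h0 : List.flatMap (fun j => if pvBye (x :: M) j then [] else [(x :: M).getD j ' ']) (List.range 1)
      = [x] := by
    simp [List.range_succ, pvBye_zero x M h]
  rw [h0]
  simp only [List.singleton_append]
  congr 1
  refine congrArg (fun F => List.flatMap F (List.range _)) (funext fun j => ?_)
  rw [Nat.add_comm 1 j, pvBye_cons₁ x M h j]
  simp

lemma pvKept_match (c : Char) (rest : List Char) (hc : pvAtomicB c = true) :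
    pvKept ('(' :: c :: ')' :: rest) = c :: pvKept rest := by
  unfold pvKept
  have hl : ('(' :: c :: ')' :: rest).length = 3 + rest.length := by simp; omega
  rw [hl, List.range_add, List.flatMap_append, List.flatMap_map]
  have h0 : List.flatMap (fun j => if pvBye ('(' :: c :: ')' :: rest) j then [] else [('(' :: c :: ')' :: rest).getD j ' ']) (List.range 3)
      = [c] := by
    have b0 : pvBye ('(' :: c :: ')' :: rest) 0 = true := by simp [pvBye, hc]
    have b1 : pvBye ('(' :: c :: ')' :: rest) 1 = false := by simp [pvBye, pvAtomicB]
    have b2 : pvBye ('(' :: c :: ')' :: rest) 2 = true := by simp [pvBye, hc]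
    simp [List.range_succ, b0, b1, b2]
  rw [h0]
  simp only [List.singleton_append]
  congr 1
  refine congrArg (fun F => List.flatMap F (List.range _)) (funext fun j => ?_)
  rw [Nat.add_comm 3 j, pvBye_cons₃ c rest j]
  simp

lemma pvKept_eq_strip : ∀ (L : List Char), pvKept L = pvStrip L := by
  intro L
  induction L using pvStrip.induct with
  | case1 c rest hc ih =>
    rw [pvKept_match c rest hc, ih, pvStrip]
    simp [hc]
  | case2 c rest hc ih =>
    rw [pvKept_cons '(' (c :: ')' :: rest) (by simp [hc]), ih, pvStrip]
    simp [hc]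
  | case3 x rest h1 ih =>
    have hno : ¬ (x = '(' ∧ rest[0]?.any pvAtomicB = true ∧ rest[1]? = some ')') := by
      rintro ⟨hx, ha, hb⟩
      rcases rest with _ | ⟨y, _ | ⟨z, u⟩⟩
      · simp at hb
      · simp at hb
      · simp at hb; exact h1 y u hx (by rw [hb])
    rw [pvKept_cons x rest hno, ih]
    conv_rhs => rw [pvStrip.eq_def]
    split
    · next c rest' heq =>
        exfalso
        simp only [List.cons.injEq] at heq
        exact h1 c rest' heq.1 heq.2
    · next y rest' h' heq =>
        simp only [List.cons.injEq] at heq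
        rw [heq.1, heq.2]
    · next heq => simp at heq
  | case4 => simp [pvKept, pvStrip]

-- ===== VERDICT (by name: the statement is the Claim_ definition above) =====
theorem cleanBracketsOnAP_spec : Claim_equal_cleanBracketsOnAP := by
  intro formula _
  show cleanBracketsOnAP formula = cleanBracketsOnAP_alt formula
  unfold cleanBracketsOnAP cleanBracketsOnAP_alt
  dsimp only
  rw [PySem.Str.len_eq]
  generalize (PySem.Str.replace (PySem.Str.replace formula "True" "#") "False" "*").toList = L
  rw [PySem.List.pyRange_zero_natCast, List.foldl_map]
  have hfun : (fun (acc : List Char) (j : Nat) =>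
      if ¬(((PySem.List.pyRange 1 ((L.length : Int) - 1)).foldl (fun s i =>
        if (('a' ≤ PySem.List.pyGetD L i ' ' ∧ PySem.List.pyGetD L i ' ' ≤ 'z') ∨
              PySem.List.pyGetD L i ' ' = '#' ∨ PySem.List.pyGetD L i ' ' = '*') ∧
            PySem.List.pyGetD L (i - 1) ' ' = '(' ∧ PySem.List.pyGetD L (i + 1) ' ' = ')'
        then PySem.Set.union s (PySem.Set.ofList [i - 1, i + 1]) else s) PySem.Set.empty).contains (j : Int) = true)
      then acc ++ (if PySem.List.pyGetD L (j : Int) ' ' = '#' then "True".toList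
            else if PySem.List.pyGetD L (j : Int) ' ' = '*' then "False".toList
            else [PySem.List.pyGetD L (j : Int) ' '])
      else acc)
      = (fun acc j => acc ++ (if pvBye L j then [] else pvExpand (L.getD j ' '))) := by
    funext acc j
    rw [pvContains_bye L j, PySem.List.pyGetD_natCast]
    by_cases hb : pvBye L j
    · simp [hb]
    · simp [hb, pvExpand]
  rw [hfun, PySem.List.foldl_append_eq_flatMap]
  have hk : (List.range L.length).flatMap (fun j => if pvBye L j then [] else pvExpand (L.getD j ' '))
      = (pvKept L).flatMap pvExpand := by
    rw [pvKept, List.flatMap_assoc]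
    refine congrArg (fun F => List.flatMap F (List.range _)) (funext fun j => ?_)
    by_cases hb : pvBye L j <;> simp [hb]
  have hrhs : PySem.Str.replace (PySem.Str.replace (String.ofList (pvStrip L)) "#" "True") "*" "False"
      = String.ofList ((pvStrip L).flatMap pvExpand) := by
    simp only [PySem.Str.replace, String.toList_ofList]
    have t1 : "#".toList = ['#'] := rfl
    have t2 : "*".toList = ['*'] := rfl
    rw [t1, t2, pvReplace_single, pvReplace_single, List.flatMap_assoc]
    refine congrArg (fun l => String.ofList (List.flatMap l (pvStrip L))) ?_
    funext c
    by_cases h1 : c = '#'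
    · subst h1; rfl
    · by_cases h2 : c = '*'
      · subst h2; rfl
      · simp [pvExpand, h1, h2]
  rw [hrhs, List.nil_append, hk, pvKept_eq_strip]
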